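-- pv_equiv track=rewrite | github.com/pypi-data/pypi-mirror-297 | packages/nlp-date-normalization-snd/nlp_date_normalization_snd-0.1.2-py3-none-any.whl/date_normalization/datestandard.py | _find_day
-- ===== SOURCE A (Python) =====
-- def _find_day(parts: list) -> tuple:
--     day = "01"
--     day_not_founded = True
--     new_parts = []
--     parts.reverse()
--     for part in parts:
--         if day_not_founded and 1 <= len(part) <= 2:
--             try:
--                 _part = int(part)
--                 if 1 <= _part <= 31:
--                     if len(part) == 2:
--                         day = part
--                     else:
--                         day = "0" + part
--                 day_not_founded = False
--             except:
--                 new_parts.append(part)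
--         else:
--             new_parts.append(part)
--     return new_parts, day
-- ===== SOURCE B (Python) =====
-- # B scans the ORIGINAL order once for the LAST short int-parsable element (the first
-- # of the reversed list), then reverses and removes it by a single slice-splice.
-- # Like A, it mutates `parts` in place with reverse().
-- def _find_day(parts: list) -> tuple:
--     cand = None
--     for i, p in enumerate(parts):
--         if 1 <= len(p) <= 2:
--             try:
--                 v = int(p)
--             except Exception:
--                 continue
--             cand = (i, p, v)
--     parts.reverse()
--     if cand is None:
--         return parts[:], "01"
--     i, p, v = cand
--     day = (p if len(p) == 2 else "0" + p) if 1 <= v <= 31 else "01"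
--     j = len(parts) - 1 - i
--     return parts[:j] + parts[j + 1:], day
-- ===== Notes on version B (the rewrite author's own statement) =====
-- stated objective: alternative
-- what changed: A walks the reversed list with a day_not_founded flag, appending every non-consumed element as it goes; B instead scans the ORIGINAL order once keeping the LAST short int-parsable element as a candidate (no flag, no reversed-order search), then reverses and deletes that single position with one slice-splice parts[:j]+parts[j+1:].
import Mathlib
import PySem

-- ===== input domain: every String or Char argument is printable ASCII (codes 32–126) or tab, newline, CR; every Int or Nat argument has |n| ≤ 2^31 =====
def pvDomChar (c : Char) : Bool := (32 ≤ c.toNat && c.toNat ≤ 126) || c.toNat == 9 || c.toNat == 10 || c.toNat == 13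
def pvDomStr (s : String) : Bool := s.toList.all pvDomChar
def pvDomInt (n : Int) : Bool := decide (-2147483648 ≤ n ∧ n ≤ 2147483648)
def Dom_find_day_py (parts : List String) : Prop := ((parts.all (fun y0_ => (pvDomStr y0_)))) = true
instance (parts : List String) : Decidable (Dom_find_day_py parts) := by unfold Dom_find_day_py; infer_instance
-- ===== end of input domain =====

-- B scans the ORIGINAL order for the LAST short int-parsable element instead of the reversed
-- order for the first, then removes it from the reversed list by one slice-splice ("alternative").
-- Both Pythons mutate `parts` in place (reverse); the equivalence proved is about the return value.

-- ===== PORT A =====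
def find_day_py (parts : List String) : List String × String :=
  let rparts := parts.reverse
  let st := rparts.foldl (fun (st : String × Bool × List String) part =>
      if st.2.1 = true ∧ 1 ≤ PySem.Str.len part ∧ PySem.Str.len part ≤ 2 then
        match PySem.Int.ofStr? part with
        | some p =>
            (if 1 ≤ p ∧ p ≤ 31 then
                (if PySem.Str.len part = 2 then part else "0" ++ part)
              else st.1, false, st.2.2)
        | none => (st.1, st.2.1, st.2.2 ++ [part])
      else (st.1, st.2.1, st.2.2 ++ [part]))
    ("01", true, ([] : List String))
  (st.2.2, st.1)

-- ===== PORT B =====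
-- Source B's forward for-loop over enumerate(parts): the LAST (index, part, value) that is short and int-parsable
def pvScan : List String → Int → Option (Int × String × Int) → Option (Int × String × Int)
  | [], _, cand => cand
  | p :: ps, i, cand =>
    if 1 ≤ PySem.Str.len p ∧ PySem.Str.len p ≤ 2 then
      match PySem.Int.ofStr? p with
      | none => pvScan ps (i + 1) cand
      | some v => pvScan ps (i + 1) (some (i, p, v))
    else pvScan ps (i + 1) cand

def find_day_py_alt (parts : List String) : List String × String :=
  let cand := pvScan parts 0 none
  let rparts := parts.reverse
  match cand with
  | none => (rparts, "01")
  | some (i, p, v) =>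
    let day := if 1 ≤ v ∧ v ≤ 31 then (if PySem.Str.len p = 2 then p else "0" ++ p) else "01"
    let j : Int := (rparts.length : Int) - 1 - i
    (PySem.List.slice rparts none (some j) ++ PySem.List.slice rparts (some (j + 1)) none, day)

-- ===== PRECONDITION & SPEC =====
def Spec_find_day_py (parts : List String) (out : List String × String) : Prop := out = find_day_py_alt parts
instance (parts : List String) (out : List String × String) : Decidable (Spec_find_day_py parts out) := by unfold Spec_find_day_py; infer_instance

-- ===== CLAIM (what is proved, stated in full; the proofs are below) =====
def Claim_equal_find_day_py : Prop := ∀ (parts : List String), Dom_find_day_py parts → Spec_find_day_py parts (find_day_py parts)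

-- ===== LEMMAS AND PROOFS =====

-- common reference shape: (rest, day) by structural recursion on the reversed list
def pvRef : List String → List String × String
  | [] => ([], "01")
  | p :: ps =>
    if 1 ≤ PySem.Str.len p ∧ PySem.Str.len p ≤ 2 then
      match PySem.Int.ofStr? p with
      | some v =>
          (ps, if 1 ≤ v ∧ v ≤ 31 then
              (if PySem.Str.len p = 2 then p else "0" ++ p)
            else "01")
      | none => (p :: (pvRef ps).1, (pvRef ps).2)
    else (p :: (pvRef ps).1, (pvRef ps).2)

-- A's loop body, named for the lemmas
def pvStepA (st : String × Bool × List String) (part : String) : String × Bool × List String :=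
  if st.2.1 = true ∧ 1 ≤ PySem.Str.len part ∧ PySem.Str.len part ≤ 2 then
    match PySem.Int.ofStr? part with
    | some p =>
        (if 1 ≤ p ∧ p ≤ 31 then
            (if PySem.Str.len part = 2 then part else "0" ++ part)
          else st.1, false, st.2.2)
    | none => (st.1, st.2.1, st.2.2 ++ [part])
  else (st.1, st.2.1, st.2.2 ++ [part])

theorem foldA_found (xs : List String) (day : String) (acc : List String) :
    xs.foldl pvStepA (day, false, acc) = (day, false, acc ++ xs) := by
  induction xs generalizing acc with
  | nil => simp
  | cons p ps ih => simp [pvStepA, ih]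

theorem foldA_ref (xs : List String) (acc : List String) :
    ∃ b, xs.foldl pvStepA ("01", true, acc) = ((pvRef xs).2, b, acc ++ (pvRef xs).1) := by
  induction xs generalizing acc with
  | nil => exact ⟨true, by simp [pvRef]⟩
  | cons p ps ih =>
    by_cases h : 1 ≤ p.length ∧ p.length ≤ 2
    · cases hv : PySem.Int.ofStr? p with
      | some v =>
        refine ⟨false, ?_⟩
        simp [pvStepA, pvRef, h, hv, foldA_found]
      | none =>
        obtain ⟨b, hb⟩ := ih (acc ++ [p])
        exact ⟨b, by simp [pvStepA, pvRef, h, hv, hb]⟩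
    · obtain ⟨b, hb⟩ := ih (acc ++ [p])
      exact ⟨b, by simp [pvStepA, pvRef, h, hb]⟩

theorem find_day_py_eq_ref (parts : List String) :
    find_day_py parts = pvRef parts.reverse := by
  obtain ⟨b, hb⟩ := foldA_ref parts.reverse []
  simp only [find_day_py]
  rw [show (fun (st : String × Bool × List String) part =>
      if st.2.1 = true ∧ 1 ≤ PySem.Str.len part ∧ PySem.Str.len part ≤ 2 then
        match PySem.Int.ofStr? part with
        | some p =>
            (if 1 ≤ p ∧ p ≤ 31 then
                (if PySem.Str.len part = 2 then part else "0" ++ part)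
              else st.1, false, st.2.2)
        | none => (st.1, st.2.1, st.2.2 ++ [part])
      else (st.1, st.2.1, st.2.2 ++ [part])) = pvStepA from rfl]
  rw [hb]
  simp

-- B-side lemmas
-- one step of Source B's scan, factored out of pvScan
def pvStepB (p : String) (i : Int) (c : Option (Int × String × Int)) : Option (Int × String × Int) :=
  if 1 ≤ PySem.Str.len p ∧ PySem.Str.len p ≤ 2 then
    match PySem.Int.ofStr? p with
    | none => c
    | some v => some (i, p, v)
  else c

theorem pvScan_cons (p : String) (xs : List String) (i : Int) (c : Option (Int × String × Int)) :
    pvScan (p :: xs) i c = pvScan xs (i + 1) (pvStepB p i c) := by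
  show (if 1 ≤ PySem.Str.len p ∧ PySem.Str.len p ≤ 2 then
      match PySem.Int.ofStr? p with
      | none => pvScan xs (i + 1) c
      | some v => pvScan xs (i + 1) (some (i, p, v))
    else pvScan xs (i + 1) c) = _
  unfold pvStepB
  split
  · cases PySem.Int.ofStr? p <;> rfl
  · rfl

theorem pvScan_append (xs ys : List String) (i : Int) (c : Option (Int × String × Int)) :
    pvScan (xs ++ ys) i c = pvScan ys (i + xs.length) (pvScan xs i c) := by
  induction xs generalizing i c with
  | nil => simp [pvScan]
  | cons p ps ih =>
    rw [List.cons_append, pvScan_cons, pvScan_cons, ih]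
    congr 1
    simp only [List.length_cons]; push_cast; omega

theorem pvScan_bounds (xs : List String) (i j : Int) (p : String) (v : Int)
    (c : Option (Int × String × Int))
    (hc : ∀ k q w, c = some (k, q, w) → k < i)
    (h : pvScan xs i c = some (j, p, v)) : j < i + xs.length := by
  induction xs generalizing i c with
  | nil =>
    simp [pvScan] at h
    have := hc j p v (by simp [h]); simp; omega
  | cons q qs ih =>
    unfold pvScan at h
    have hnext : ∀ (c' : Option (Int × String × Int)),
        (∀ k r w, c' = some (k, r, w) → k < i + 1) →
        pvScan qs (i + 1) c' = some (j, p, v) → j < i + (q :: qs).length := by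
      intro c' hc' h'
      have := ih (i + 1) c' hc' h'
      simp at this ⊢; omega
    split at h
    · cases hv : PySem.Int.ofStr? q <;> rw [hv] at h
      · exact hnext c (fun k r w hk => by have := hc k r w hk; omega) h
      · exact hnext _ (fun k r w hk => by simp at hk; omega) h
    · exact hnext c (fun k r w hk => by have := hc k r w hk; omega) h

theorem pvScan_nonneg (xs : List String) (s j : Int) (p : String) (v : Int)
    (c : Option (Int × String × Int))
    (hc : ∀ k r u, c = some (k, r, u) → 0 ≤ k) (hs : 0 ≤ s)
    (h : pvScan xs s c = some (j, p, v)) : 0 ≤ j := by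
  induction xs generalizing s c with
  | nil => simp [pvScan] at h; exact hc j p v (by simp [h])
  | cons y ys ih =>
    unfold pvScan at h
    split at h
    · cases hv : PySem.Int.ofStr? y <;> rw [hv] at h
      · exact ih (s + 1) c hc (by omega) h
      · exact ih (s + 1) _ (fun k r u hk => by simp at hk; omega) (by omega) h
    · exact ih (s + 1) c hc (by omega) h

-- the shape B computes, as a function of the reversed list ys (pvScan runs over ys.reverse = the original)
def pvAltCore (ys : List String) : List String × String :=
  match pvScan ys.reverse 0 none with
  | none => (ys, "01")
  | some (i, p, v) =>
    (PySem.List.slice ys none (some ((ys.length : Int) - 1 - i)) ++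
        PySem.List.slice ys (some ((ys.length : Int) - 1 - i + 1)) none,
      if 1 ≤ v ∧ v ≤ 31 then (if PySem.Str.len p = 2 then p else "0" ++ p) else "01")

-- when the new head p of ys is skipped by the scan, B's result is p consed onto the sub-result
theorem pvSkip (p : String) (ps : List String)
    (ih : pvAltCore ps = pvRef ps)
    (hfull : pvScan (p :: ps).reverse 0 none = pvScan ps.reverse 0 none) :
    pvAltCore (p :: ps) = (p :: (pvRef ps).1, (pvRef ps).2) := by
  unfold pvAltCore
  rw [hfull]
  unfold pvAltCore at ih
  cases hscan : pvScan ps.reverse 0 none with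
  | none => rw [hscan] at ih; simpa using congrArg (fun r => (p :: r.1, r.2)) ih
  | some ipv =>
    obtain ⟨i, q, w⟩ := ipv
    rw [hscan] at ih
    have hirange : i < (ps.length : Int) := by
      have := pvScan_bounds ps.reverse 0 i q w none (by simp) hscan
      simpa using this
    have hi0 : 0 ≤ i := pvScan_nonneg ps.reverse 0 i q w none (by simp) le_rfl hscan
    obtain ⟨inat, rfl⟩ : ∃ n : Nat, i = (n : Int) := ⟨i.toNat, (Int.toNat_of_nonneg hi0).symm⟩
    dsimp only at ih ⊢
    have hlt : inat < ps.length := by exact_mod_cast hirange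
    have hjfull : ((p :: ps).length : Int) - 1 - (inat : Int)
        = (((ps.length - inat : Nat)) : Int) := by simp; omega
    have hjsub : ((ps.length : Int)) - 1 - (inat : Int)
        = (((ps.length - 1 - inat : Nat)) : Int) := by push_cast; omega
    rw [hjfull]
    have hjadd : (((ps.length - inat : Nat)) : Int) + 1
        = (((ps.length - inat + 1 : Nat)) : Int) := by push_cast; ring
    rw [hjadd, PySem.List.slice_to_natCast, PySem.List.slice_from_natCast]
    rw [hjsub] at ih
    have hjsadd : (((ps.length - 1 - inat : Nat)) : Int) + 1
        = (((ps.length - 1 - inat + 1 : Nat)) : Int) := by simp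
    rw [hjsadd, PySem.List.slice_to_natCast, PySem.List.slice_from_natCast] at ih
    have e1 : (p :: ps).take (ps.length - inat) = p :: ps.take (ps.length - 1 - inat) := by
      have : ps.length - inat = (ps.length - 1 - inat) + 1 := by omega
      rw [this, List.take_succ_cons]
    have e2 : (p :: ps).drop (ps.length - inat + 1) = ps.drop (ps.length - 1 - inat + 1) := by
      have : ps.length - inat + 1 = (ps.length - 1 - inat + 1) + 1 := by omega
      rw [this, List.drop_succ_cons]
    rw [e1, e2]
    simpa using congrArg (fun r : List String × String => (p :: r.1, r.2)) ih

theorem alt_core (ys : List String) : pvAltCore ys = pvRef ys := by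
  induction ys with
  | nil => simp [pvAltCore, pvScan, pvRef]
  | cons p ps ih =>
    have hsplit : (p :: ps).reverse = ps.reverse ++ [p] := by simp
    by_cases h : 1 ≤ PySem.Str.len p ∧ PySem.Str.len p ≤ 2
    · have h' : 1 ≤ p.length ∧ p.length ≤ 2 := by simpa using h
      cases hv : PySem.Int.ofStr? p with
      | some v =>
        unfold pvAltCore
        rw [hsplit, pvScan_append]
        have hs : pvScan [p] (0 + (ps.reverse).length) (pvScan ps.reverse 0 none)
            = some ((ps.length : Int), p, v) := by
          rw [pvScan_cons]
          simp [pvScan, pvStepB, h', hv]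
        rw [hs]
        dsimp only
        have hj : ((p :: ps).length : Int) - 1 - (ps.length : Int) = ((0 : Nat) : Int) := by
          simp
        have hj1 : (((0 : Nat) : Int)) + 1 = ((1 : Nat) : Int) := by norm_num
        rw [hj, hj1, PySem.List.slice_to_natCast, PySem.List.slice_from_natCast]
        unfold pvRef
        rw [if_pos h, hv]
        simp
      | none =>
        have href : pvRef (p :: ps) = (p :: (pvRef ps).1, (pvRef ps).2) := by
          conv_lhs => unfold pvRef
          rw [if_pos h, hv]
        rw [href]
        refine pvSkip p ps ih ?_
        rw [hsplit, pvScan_append, pvScan_cons]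
        simp [pvScan, pvStepB, h', hv]
    · have href : pvRef (p :: ps) = (p :: (pvRef ps).1, (pvRef ps).2) := by
        conv_lhs => unfold pvRef
        rw [if_neg h]
      rw [href]
      refine pvSkip p ps ih ?_
      rw [hsplit, pvScan_append, pvScan_cons]
      have h' : ¬(1 ≤ p.length ∧ p.length ≤ 2) := by simpa using h
      simp [pvScan, pvStepB, h']

theorem find_day_py_alt_eq_ref (parts : List String) :
    find_day_py_alt parts = pvRef parts.reverse := by
  have h := alt_core parts.reverse
  unfold pvAltCore at h
  rw [List.reverse_reverse] at h
  simpa [find_day_py_alt] using h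

-- ===== VERDICT (by name: the statement is the Claim_ definition above) =====
theorem find_day_py_spec : Claim_equal_find_day_py := by
  intro parts _
  unfold Spec_find_day_py
  rw [find_day_py_eq_ref, find_day_py_alt_eq_ref]
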